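-- pv_equiv track=rewrite | github.com/RedHatQE/openshift-python-wrapper | fake_kubernetes_client/status_schema_parser.py | _pick_enum_value
-- ===== SOURCE A (Python) =====
-- def _pick_enum_value(field_name: str, enum_values: list[str], is_ready: bool = True) -> str:
--     """Pick an appropriate enum value based on field name"""
--     if not enum_values:
--         return ""
--
--     # Smart selection based on field name and ready status
--     if field_name == "phase":
--         if is_ready:
--             # Prefer positive states
--             positive_states = ["Bound", "Running", "Active", "Ready", "Available", "Succeeded", "Complete"]
--             for state in positive_states:
--                 if state in enum_values:
--                     return state
--         else:
--             # Prefer negative/pending states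
--             negative_states = ["Failed", "Error", "Terminating", "Pending", "Unknown"]
--             for state in negative_states:
--                 if state in enum_values:
--                     return state
--         # Fallback to first value
--         return enum_values[0]
--
--     elif field_name == "status" or field_name.endswith("Status"):
--         # For condition statuses
--         if is_ready and "True" in enum_values:
--             return "True"
--         elif not is_ready and "False" in enum_values:
--             return "False"
--         elif "Unknown" in enum_values:
--             return "Unknown"
--
--     elif field_name == "type" or field_name.endswith("Type"):
--         # For condition types, prefer "Ready" or "Available"
--         preferred = ["Ready", "Available", "Initialized", "Progressing"]
--         for pref in preferred:
--             if pref in enum_values: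
--                 return pref
--
--     # Default to first value
--     return enum_values[0]
-- ===== SOURCE B (Python) =====
-- def _pick_enum_value(field_name: str, enum_values: list[str], is_ready: bool = True) -> str:
--     """Argmin pass over the options: rank each candidate by its position in the
--     category's preference order and keep the lowest-ranked one seen."""
--     if not enum_values:
--         return ""
--     if field_name == "phase":
--         prefs = (["Bound", "Running", "Active", "Ready", "Available", "Succeeded", "Complete"]
--                  if is_ready else
--                  ["Failed", "Error", "Terminating", "Pending", "Unknown"])
--     elif field_name == "status" or field_name.endswith("Status"):
--         prefs = ["True", "Unknown"] if is_ready else ["False", "Unknown"]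
--     elif field_name == "type" or field_name.endswith("Type"):
--         prefs = ["Ready", "Available", "Initialized", "Progressing"]
--     else:
--         prefs = []
--     best = None
--     best_rank = None
--     for value in enum_values:
--         if value in prefs:
--             rank = prefs.index(value)
--             if best_rank is None or rank < best_rank:
--                 best, best_rank = value, rank
--     return best if best is not None else enum_values[0]
-- ===== Notes on version B (the rewrite author's own statement) =====
-- stated objective: alternative
-- what changed: B inverts the traversal: instead of A's scans over the preference lists testing membership in the options, B makes a single argmin pass over enum_values, ranking each option by its position in the category's preference order and keeping the lowest-ranked one.
import Mathlib
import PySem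

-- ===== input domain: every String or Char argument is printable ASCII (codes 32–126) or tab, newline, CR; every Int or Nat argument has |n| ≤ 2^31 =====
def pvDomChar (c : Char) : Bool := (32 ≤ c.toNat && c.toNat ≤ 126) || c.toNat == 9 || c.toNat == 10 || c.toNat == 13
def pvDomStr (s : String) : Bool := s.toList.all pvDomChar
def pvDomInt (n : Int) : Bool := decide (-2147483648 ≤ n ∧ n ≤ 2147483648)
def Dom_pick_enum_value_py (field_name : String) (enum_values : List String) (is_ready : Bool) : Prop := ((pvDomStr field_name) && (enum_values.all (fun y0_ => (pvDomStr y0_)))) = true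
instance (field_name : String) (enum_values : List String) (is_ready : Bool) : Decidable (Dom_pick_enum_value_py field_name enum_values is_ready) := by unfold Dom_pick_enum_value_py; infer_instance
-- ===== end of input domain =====

-- B replaces A's scans over the preference lists with a single argmin pass over the options (rank = position in the category's preference order); objective: alternative.


-- ===== PORT A =====
def pick_enum_value_py (field_name : String) (enum_values : List String) (is_ready : Bool) : String :=
  if enum_values = [] then ""
  else if field_name = "phase" then
    (if is_ready then
      match (["Bound", "Running", "Active", "Ready", "Available", "Succeeded", "Complete"].find?
              (fun state => enum_values.contains state)) with
      | some state => state
      | none => enum_values.headD ""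
    else
      match (["Failed", "Error", "Terminating", "Pending", "Unknown"].find?
              (fun state => enum_values.contains state)) with
      | some state => state
      | none => enum_values.headD "")
  else if field_name = "status" || PySem.Str.endswith field_name "Status" then
    (if is_ready && enum_values.contains "True" then "True"
     else if !is_ready && enum_values.contains "False" then "False"
     else if enum_values.contains "Unknown" then "Unknown"
     else enum_values.headD "")
  else if field_name = "type" || PySem.Str.endswith field_name "Type" then
    match (["Ready", "Available", "Initialized", "Progressing"].find?
            (fun pref => enum_values.contains pref)) with
    | some pref => pref
    | none => enum_values.headD ""
  else enum_values.headD ""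

-- ===== PORT B =====
-- B's loop over the options: keep the (value, rank) with the smallest rank seen so far.
-- Python's `if value in prefs: rank = prefs.index(value)` is ported as one match on
-- PySem.List.index? (exact: .index raises only when the membership guard is false).
def pvScanBest (prefs : List String) : List String → Option (String × Nat) → Option (String × Nat)
  | [], best => best
  | v :: rest, best =>
      pvScanBest prefs rest
        (match PySem.List.index? prefs v with
         | none => best
         | some r =>
           match best with
           | none => some (v, r)
           | some (_, br) => if r < br then some (v, r) else best)

-- the category's preference order (B's if/elif chain assigning `prefs`)
def pvPrefsFor (field_name : String) (is_ready : Bool) : List String :=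
  if field_name = "phase" then
    if is_ready then ["Bound", "Running", "Active", "Ready", "Available", "Succeeded", "Complete"]
    else ["Failed", "Error", "Terminating", "Pending", "Unknown"]
  else if field_name = "status" || PySem.Str.endswith field_name "Status" then
    if is_ready then ["True", "Unknown"] else ["False", "Unknown"]
  else if field_name = "type" || PySem.Str.endswith field_name "Type" then
    ["Ready", "Available", "Initialized", "Progressing"]
  else []

def pick_enum_value_py_alt (field_name : String) (enum_values : List String) (is_ready : Bool) : String :=
  if enum_values = [] then ""
  else
    match pvScanBest (pvPrefsFor field_name is_ready) enum_values none with
    | some (v, _) => v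
    | none => enum_values.headD ""

-- ===== PRECONDITION & SPEC =====
def Spec_pick_enum_value_py (field_name : String) (enum_values : List String) (is_ready : Bool) (out : String) : Prop := out = pick_enum_value_py_alt field_name enum_values is_ready
instance (field_name : String) (enum_values : List String) (is_ready : Bool) (out : String) : Decidable (Spec_pick_enum_value_py field_name enum_values is_ready out) := by unfold Spec_pick_enum_value_py; infer_instance

-- ===== CLAIM (what is proved, stated in full; the proofs are below) =====
def Claim_equal_pick_enum_value_py : Prop := ∀ (field_name : String) (enum_values : List String) (is_ready : Bool), Dom_pick_enum_value_py field_name enum_values is_ready → Spec_pick_enum_value_py field_name enum_values is_ready (pick_enum_value_py field_name enum_values is_ready)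

-- ===== LEMMAS AND PROOFS =====

-- the scan is none iff nothing seen (incl. the accumulator) has a rank
lemma pvScanBest_eq_none (prefs : List String) :
    ∀ (ev : List String) (acc : Option (String × Nat)),
      pvScanBest prefs ev acc = none ↔ acc = none ∧ ∀ v ∈ ev, PySem.List.index? prefs v = none := by
  intro ev
  induction ev with
  | nil => intro acc; simp [pvScanBest]
  | cons v rest ih =>
    intro acc
    simp only [pvScanBest]
    cases h : PySem.List.index? prefs v with
    | none =>
      rw [ih]
      constructor
      · rintro ⟨h1, h2⟩
        refine ⟨h1, fun w hw => ?_⟩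
        rcases List.mem_cons.mp hw with hw | hw
        · exact hw ▸ h
        · exact h2 w hw
      · rintro ⟨h1, h2⟩
        exact ⟨h1, fun w hw => h2 w (List.mem_cons_of_mem _ hw)⟩
    | some r =>
      rw [ih]
      constructor
      · rintro ⟨h1, -⟩
        exfalso
        cases acc with
        | none => simp at h1
        | some b => cases b with | mk bv br => by_cases hr : r < br <;> simp [hr] at h1
      · rintro ⟨-, h2⟩
        refine absurd h ?_
        have h0 := h2 v List.mem_cons_self
        rw [PySem.List.index?_eq_idxOf?] at h0
        simp [h0]

-- what a some-result of the scan means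
lemma pvScanBest_eq_some (prefs : List String) :
    ∀ (ev : List String) (acc : Option (String × Nat)) (v : String) (r : Nat),
      pvScanBest prefs ev acc = some (v, r) →
      (acc = some (v, r) ∨ (v ∈ ev ∧ PySem.List.index? prefs v = some r)) ∧
      (∀ bv br, acc = some (bv, br) → r ≤ br) ∧
      (∀ w ∈ ev, ∀ s, PySem.List.index? prefs w = some s → r ≤ s) := by
  intro ev
  induction ev with
  | nil =>
    intro acc v r h
    simp [pvScanBest] at h
    exact ⟨Or.inl h, by rintro bv br rfl; simp_all, by simp⟩
  | cons x rest ih =>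
    intro acc v r h
    simp only [pvScanBest] at h
    cases hx : PySem.List.index? prefs x with
    | none =>
      rw [hx] at h
      obtain ⟨h1, h2, h3⟩ := ih acc v r h
      refine ⟨?_, h2, ?_⟩
      · rcases h1 with h1 | ⟨hm, hi⟩
        · exact Or.inl h1
        · exact Or.inr ⟨List.mem_cons_of_mem _ hm, hi⟩
      · intro w hw s hs
        rcases List.mem_cons.mp hw with hw | hw
        · exact absurd hs (hw ▸ hx ▸ by simp)
        · exact h3 w hw s hs
    | some rx =>
      rw [hx] at h
      -- acc' is the combined accumulator after seeing x
      cases acc with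
      | none =>
        obtain ⟨h1, h2, h3⟩ := ih (some (x, rx)) v r h
        refine ⟨?_, by simp, ?_⟩
        · rcases h1 with h1 | ⟨hm, hi⟩
          · simp at h1
            exact Or.inr ⟨by simp [h1.1], by rw [← h1.1, hx, h1.2]⟩
          · exact Or.inr ⟨List.mem_cons_of_mem _ hm, hi⟩
        · intro w hw s hs
          rcases List.mem_cons.mp hw with hw | hw
          · have : s = rx := by rw [hw, hx] at hs; exact (Option.some.inj hs).symm
            exact this ▸ h2 x rx rfl
          · exact h3 w hw s hs
      | some b =>
        cases b with
        | mk bv br =>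
          by_cases hlt : rx < br
          · simp only [hlt, if_true] at h
            obtain ⟨h1, h2, h3⟩ := ih (some (x, rx)) v r h
            refine ⟨?_, ?_, ?_⟩
            · rcases h1 with h1 | ⟨hm, hi⟩
              · simp at h1
                exact Or.inr ⟨by simp [h1.1], by rw [← h1.1, hx, h1.2]⟩
              · exact Or.inr ⟨List.mem_cons_of_mem _ hm, hi⟩
            · rintro bv' br' heq
              injection heq with heq; cases heq
              have := h2 x rx rfl
              omega
            · intro w hw s hs
              rcases List.mem_cons.mp hw with hw | hw
              · have : s = rx := by rw [hw, hx] at hs; exact (Option.some.inj hs).symm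
                exact this ▸ h2 x rx rfl
              · exact h3 w hw s hs
          · simp only [hlt, if_false] at h
            obtain ⟨h1, h2, h3⟩ := ih (some (bv, br)) v r h
            refine ⟨?_, h2, ?_⟩
            · rcases h1 with h1 | ⟨hm, hi⟩
              · exact Or.inl h1
              · exact Or.inr ⟨List.mem_cons_of_mem _ hm, hi⟩
            · intro w hw s hs
              rcases List.mem_cons.mp hw with hw | hw
              · have hs' : s = rx := by rw [hw, hx] at hs; exact (Option.some.inj hs).symm
                have := h2 bv br rfl
                omega
              · exact h3 w hw s hs

-- the argmin-by-rank over the options picks exactly the first preference present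
lemma pvScanBest_fst_eq_find? (prefs ev : List String) :
    (pvScanBest prefs ev none).map Prod.fst = prefs.find? (fun p => ev.contains p) := by
  cases hf : prefs.find? (fun p => ev.contains p) with
  | none =>
    have hnone : pvScanBest prefs ev none = none := by
      rw [pvScanBest_eq_none]
      refine ⟨rfl, fun v hv => ?_⟩
      cases hi : PySem.List.index? prefs v with
      | none => rfl
      | some r =>
        exfalso
        obtain ⟨hk, hget, -⟩ := PySem.List.getElem_of_index?_eq_some hi
        have hvprefs : v ∈ prefs := hget ▸ List.getElem_mem hk
        exact absurd hv (by simpa using List.find?_eq_none.mp hf v hvprefs)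
    simp [hnone]
  | some p =>
    obtain ⟨hp, i, hilt, hgi, hfirst⟩ := (List.find?_eq_some_iff_getElem.mp hf)
    have hpev : p ∈ ev := by simpa using hp
    -- the scan cannot be none
    have hpidx : (PySem.List.index? prefs p).isSome := by
      rw [PySem.List.index?_isSome_iff]
      exact hgi ▸ List.getElem_mem hilt
    obtain ⟨r0, hr0⟩ := Option.isSome_iff_exists.mp hpidx
    cases hs : pvScanBest prefs ev none with
    | none =>
      exfalso
      have := ((pvScanBest_eq_none prefs ev none).mp hs).2 p hpev
      rw [this] at hr0; cases hr0
    | some b =>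
      cases b with
      | mk v r =>
        obtain ⟨h1, -, h3⟩ := pvScanBest_eq_some prefs ev none v r hs
        rcases h1 with h1 | ⟨hm, hi⟩
        · cases h1
        obtain ⟨hk, hget, -⟩ := PySem.List.getElem_of_index?_eq_some hi
        -- index of p: first occurrence ≤ i, and any occurrence index witnessing p ∈ ev gives = i is not needed;
        -- r ≤ r0 and r0 ≤ i (first occurrence of p is at or before i)
        have hr_le : r ≤ r0 := h3 p hpev r0 hr0
        obtain ⟨hk0, hget0, hmin0⟩ := PySem.List.getElem_of_index?_eq_some hr0
        have hr0_le_i : r0 ≤ i := by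
          by_contra hc
          push Not at hc
          exact hmin0 i hc hgi
        -- prefs[r] = v ∈ ev, so by minimality of the find? index, i ≤ r
        have hi_le_r : i ≤ r := by
          by_contra hc
          push Not at hc
          have := hfirst r hc
          simp only [hget] at this
          exact absurd (by simpa using hm) (by simpa using this)
        have hri : r = i := le_antisymm (le_trans hr_le hr0_le_i) hi_le_r
        have hvp : v = p := by
          have e1 : prefs[r]? = some v := by rw [List.getElem?_eq_getElem hk, hget]
          have e2 : prefs[i]? = some p := by rw [List.getElem?_eq_getElem hilt, hgi]
          rw [hri, e2] at e1
          exact (Option.some.inj e1).symm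
        simp [hvp]

-- B's argmin scan, folded back into first-preference-present form
lemma alt_eq_find (field_name : String) (ev : List String) (is_ready : Bool) :
    pick_enum_value_py_alt field_name ev is_ready =
    (if ev = [] then "" else
      match (pvPrefsFor field_name is_ready).find? (fun p => ev.contains p) with
      | some p => p
      | none => ev.headD "") := by
  unfold pick_enum_value_py_alt
  by_cases he : ev = []
  · simp [he]
  · simp only [he, if_false]
    have h := pvScanBest_fst_eq_find? (pvPrefsFor field_name is_ready) ev
    cases hs : pvScanBest (pvPrefsFor field_name is_ready) ev none with
    | none =>
      rw [hs] at h
      simp only [Option.map_none] at h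
      rw [← h]
    | some b =>
      cases b with
      | mk v r =>
        rw [hs] at h
        simp only [Option.map_some] at h
        rw [← h]

-- ===== VERDICT (by name: the statement is the Claim_ definition above) =====
theorem pick_enum_value_py_spec : Claim_equal_pick_enum_value_py := by
  intro field_name enum_values is_ready _
  unfold Spec_pick_enum_value_py
  rw [alt_eq_find]
  unfold pick_enum_value_py pvPrefsFor
  by_cases he : enum_values = []
  · simp [he]
  · simp only [he, if_false]
    split_ifs with h1 h2 h3 h4 <;>
      cases is_ready <;>
        simp_all [List.find?]
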